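-- pv_equiv track=rewrite | github.com/shurrey/illuminate-mcp-opensource | src/illuminate_mcp/planner.py | _best_name_or_id
-- ===== SOURCE A (Python) =====
-- from typing import Dict, List, Sequence, Set, Tuple
--
-- def _best_name_or_id(columns: Sequence[str]) -> str:
--     for col in columns:
--         if col.endswith("_NAME"):
--             return col
--     for col in columns:
--         if col.endswith("_ID"):
--             return col
--     return columns[0] if columns else "*"
-- ===== SOURCE B (Python) =====
-- def _best_name_or_id(columns):
--     first_id = None
--     for col in columns:
--         if col.endswith("_NAME"):
--             return col
--         if first_id is None and col.endswith("_ID"):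
--             first_id = col
--     if first_id is not None:
--         return first_id
--     return columns[0] if columns else "*"
-- ===== Notes on version B (the rewrite author's own statement) =====
-- stated objective: simpler
-- what changed: Replaces A's two sequential scans (first for _NAME, then for _ID) with a single pass that returns on the first _NAME and remembers the first _ID as a candidate for after the loop.
import Mathlib
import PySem

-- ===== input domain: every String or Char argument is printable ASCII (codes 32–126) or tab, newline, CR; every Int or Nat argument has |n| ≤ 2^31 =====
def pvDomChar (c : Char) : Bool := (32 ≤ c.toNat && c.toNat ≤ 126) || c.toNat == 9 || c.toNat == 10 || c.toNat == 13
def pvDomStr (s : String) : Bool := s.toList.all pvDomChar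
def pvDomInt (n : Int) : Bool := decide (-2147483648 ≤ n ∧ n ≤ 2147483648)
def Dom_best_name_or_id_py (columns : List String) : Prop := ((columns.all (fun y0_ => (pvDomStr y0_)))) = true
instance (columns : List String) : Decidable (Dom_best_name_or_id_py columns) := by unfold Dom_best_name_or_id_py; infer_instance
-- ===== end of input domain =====

-- B merges A's two sequential scans (_NAME then _ID) into a single pass that remembers the first _ID candidate (objective: simpler); same return value on every input.


-- ===== PORT A =====
-- first loop: scan for a column ending in "_NAME"
def pvLoopName : List String → Option String
  | [] => none
  | c :: rest => if PySem.Str.endswith c "_NAME" then some c else pvLoopName rest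

-- second loop: scan for a column ending in "_ID"
def pvLoopId : List String → Option String
  | [] => none
  | c :: rest => if PySem.Str.endswith c "_ID" then some c else pvLoopId rest

def best_name_or_id_py (columns : List String) : String :=
  match pvLoopName columns with
  | some c => c
  | none =>
    match pvLoopId columns with
    | some c => c
    | none => match columns with
      | [] => "*"
      | c :: _ => c

-- ===== PORT B =====
-- single pass: return first _NAME at once, remember the first _ID; `fb` is the
-- post-loop fallback (columns[0] if columns else "*")
def pvGoB : List String → Option String → String → String
  | [], firstId, fb => firstId.getD fb
  | c :: rest, firstId, fb =>
    if PySem.Str.endswith c "_NAME" then c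
    else pvGoB rest (if firstId.isNone && PySem.Str.endswith c "_ID" then some c else firstId) fb

def best_name_or_id_py_alt (columns : List String) : String :=
  pvGoB columns none (match columns with | [] => "*" | c :: _ => c)

-- ===== PRECONDITION & SPEC =====
def Spec_best_name_or_id_py (columns : List String) (out : String) : Prop := out = best_name_or_id_py_alt columns
instance (columns : List String) (out : String) : Decidable (Spec_best_name_or_id_py columns out) := by unfold Spec_best_name_or_id_py; infer_instance

-- ===== CLAIM (what is proved, stated in full; the proofs are below) =====
def Claim_equal_best_name_or_id_py : Prop := ∀ (columns : List String), Dom_best_name_or_id_py columns → Spec_best_name_or_id_py columns (best_name_or_id_py columns)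

-- ===== LEMMAS AND PROOFS =====

-- ===== VERDICT (by name: the statement is the Claim_ definition above) =====
theorem pvGoB_eq (cols : List String) (fid : Option String) (fb : String) :
    pvGoB cols fid fb =
      match pvLoopName cols with
      | some c => c
      | none => match fid with
        | some i => i
        | none => match pvLoopId cols with
          | some c => c
          | none => fb := by
  induction cols generalizing fid with
  | nil => cases fid <;> simp [pvGoB, pvLoopName, pvLoopId]
  | cons c rest ih =>
    simp only [pvGoB, pvLoopName, pvLoopId]
    rw [ih]
    by_cases hn : PySem.Chars.endswith c.toList ['_', 'N', 'A', 'M', 'E'] = true <;>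
      by_cases hi : PySem.Chars.endswith c.toList ['_', 'I', 'D'] = true <;>
      cases fid <;>
      cases hL : pvLoopName rest <;>
      cases hI : pvLoopId rest <;>
      simp [hn, hi, hL, hI]

theorem best_name_or_id_py_spec : Claim_equal_best_name_or_id_py := by
  intro columns _
  unfold Spec_best_name_or_id_py best_name_or_id_py best_name_or_id_py_alt
  rw [pvGoB_eq]
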